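-- pv_equiv track=rewrite | github.com/VuNgocSown/Python_PTIT | PY01024.py | check
-- ===== SOURCE A (Python) =====
-- def check(n):
--     sum = n % 10
--     c = n % 10
--     n //= 10
--     while(n > 0):
--         ed = n % 10
--         sum += ed
--         if(abs(ed-c)!=2):
--             return 0
--         c = ed
--         n //= 10
--     if(sum % 10 != 0):
--         return 0
--     return 1
-- ===== SOURCE B (Python) =====
-- def check(n):
--     digits = [n % 10]
--     n //= 10
--     while n > 0:
--         digits.append(n % 10)
--         n //= 10
--     if sum(digits) % 10 != 0:
--         return 0
--     if not all(abs(a - b) == 2 for a, b in zip(digits, digits[1:])):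
--         return 0
--     return 1
-- ===== Notes on version B (the rewrite author's own statement) =====
-- stated objective: simpler
-- what changed: B first extracts the digit list, then decides the answer in two separate whole-list passes (digit sum divisible by 10, all adjacent differences of magnitude 2) instead of A's single fused loop with early returns and carried state.
import Mathlib
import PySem

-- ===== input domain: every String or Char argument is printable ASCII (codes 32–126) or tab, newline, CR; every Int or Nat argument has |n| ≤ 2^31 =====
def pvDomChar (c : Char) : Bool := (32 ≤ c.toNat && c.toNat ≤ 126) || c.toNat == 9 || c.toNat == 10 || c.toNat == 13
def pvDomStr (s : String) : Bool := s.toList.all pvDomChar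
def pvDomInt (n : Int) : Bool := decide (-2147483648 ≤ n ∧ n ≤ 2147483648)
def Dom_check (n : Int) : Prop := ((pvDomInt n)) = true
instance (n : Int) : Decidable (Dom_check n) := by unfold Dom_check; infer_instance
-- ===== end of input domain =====

-- B decides the answer from an extracted digit list in two whole-list passes; objective: simpler.

-- ===== PORT A =====
def checkLoop (n sum c : Int) : Int :=
  if _h : n > 0 then
    let ed := PySem.Int.mod n 10
    if (ed - c).natAbs ≠ 2 then 0
    else checkLoop (PySem.Int.floordiv n 10) (sum + ed) ed
  else if PySem.Int.mod sum 10 ≠ 0 then 0 else 1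
termination_by n.toNat
decreasing_by
  have h1 : n.fdiv 10 = n / 10 := by
    rw [Int.fdiv_eq_ediv]
    have h0 : (0:Int) ≤ 10 := by norm_num
    simp [h0]
  simp [PySem.Int.floordiv, h1]
  omega

def check (n : Int) : Int :=
  checkLoop (PySem.Int.floordiv n 10) (PySem.Int.mod n 10) (PySem.Int.mod n 10)

-- ===== PORT B =====
def digitsLoop (n : Int) : List Int :=
  if _h : n > 0 then PySem.Int.mod n 10 :: digitsLoop (PySem.Int.floordiv n 10)
  else []
termination_by n.toNat
decreasing_by
  have h1 : n.fdiv 10 = n / 10 := by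
    rw [Int.fdiv_eq_ediv]
    have h0 : (0:Int) ≤ 10 := by norm_num
    simp [h0]
  simp [PySem.Int.floordiv, h1]
  omega

def check_alt (n : Int) : Int :=
  let digits : List Int := PySem.Int.mod n 10 :: digitsLoop (PySem.Int.floordiv n 10)
  if PySem.Int.mod digits.sum 10 ≠ 0 then 0
  else if ¬ ((digits.zip digits.tail).all (fun p => (p.1 - p.2).natAbs = 2)) then 0
  else 1

-- ===== PRECONDITION & SPEC =====
def Spec_check (n : Int) (out : Int) : Prop := out = check_alt n
instance (n : Int) (out : Int) : Decidable (Spec_check n out) := by unfold Spec_check; infer_instance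

-- ===== CLAIM (what is proved, stated in full; the proofs are below) =====
def Claim_equal_check : Prop := ∀ (n : Int), Dom_check n → Spec_check n (check n)

-- ===== LEMMAS AND PROOFS =====

-- proof-only helper: recursive adjacency check, previous digit c, remaining digits ds
def adjOK : Int → List Int → Bool
  | _, [] => true
  | c, d :: ds => decide ((d - c).natAbs = 2) && adjOK d ds

-- A's fused loop equals "digit-sum test, then adjacency test" over digitsLoop n after c.
theorem checkLoop_eq (n sum c : Int) :
    checkLoop n sum c =
      if PySem.Int.mod (sum + (digitsLoop n).sum) 10 ≠ 0 then 0
      else if ¬ adjOK c (digitsLoop n) then 0 else 1 := by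
  induction n, sum, c using checkLoop.induct with
  | case1 n sum c h ed hbad =>
    rw [checkLoop, digitsLoop]
    simp only [dif_pos h]
    rw [if_pos hbad]
    have hadj : adjOK c (PySem.Int.mod n 10 :: digitsLoop (PySem.Int.floordiv n 10)) = false := by
      rw [adjOK, decide_eq_false hbad, Bool.false_and]
    rw [hadj]
    simp
  | case2 n sum c h ed hgood ih =>
    rw [checkLoop, digitsLoop]
    simp only [dif_pos h]
    rw [if_neg hgood, ih]
    have hcc : ((PySem.Int.mod n 10) - c).natAbs = 2 := not_not.mp hgood
    have hadj : adjOK c (PySem.Int.mod n 10 :: digitsLoop (PySem.Int.floordiv n 10))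
        = adjOK (PySem.Int.mod n 10) (digitsLoop (PySem.Int.floordiv n 10)) := by
      rw [adjOK, decide_eq_true hcc, Bool.true_and]
    rw [hadj, List.sum_cons, ← add_assoc]
  | case3 n sum c h h2 =>
    rw [checkLoop, digitsLoop]
    simp [h, adjOK]
  | case4 n sum c h h2 =>
    rw [checkLoop, digitsLoop]
    simp [h, adjOK]

-- the zip-based adjacency pass of B equals the recursive adjacency check
theorem zipAll_adjOK (ds : List Int) : ∀ (c : Int),
    (((c :: ds).zip ds).all (fun p => decide ((p.1 - p.2).natAbs = 2))) = adjOK c ds := by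
  induction ds with
  | nil => intro c; simp [adjOK]
  | cons d ds ih =>
    intro c
    have hx : (c - d).natAbs = (d - c).natAbs := by omega
    simp [List.zip_cons_cons, List.all_cons, adjOK, hx, ih]

-- ===== VERDICT (by name: the statement is the Claim_ definition above) =====
theorem check_spec : Claim_equal_check := by
  intro n _
  unfold Spec_check check check_alt
  rw [checkLoop_eq]
  simp only [List.tail_cons, List.sum_cons, zipAll_adjOK]
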